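-- pv_equiv track=rewrite | github.com/Cassiexyq/Program-Exercise | 笔试/爱奇艺/排列计数.py | dfs
-- ===== SOURCE A (Python) =====
-- def dfs(n, yq):
--     queue = [[i] for i in range(1,n+1)]
--     for i in range(len(yq)):
--         while queue and len(queue[0]) == (i+1):
--             temp = queue.pop(0)
--             idx = temp[-1]
--             if yq[i] == 1:
--                 if idx == 1: continue
--                 else:
--                     for num in range(idx-1,0,-1):
--                         if num not in temp:
--                             queue.append(temp + [num])
--             else:
--                 if idx == n: continue
--                 else:
--                     for num in range(idx+1, n+1):
--                         if num not in temp: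
--                             queue.append(temp +[num])
--
--     return queue
-- ===== SOURCE B (Python) =====
-- def dfs(n, yq):
--     # Recursive backtracking (DFS) instead of A's level-by-level BFS queue.
--     res = []
--
--     def go(partial, rest):
--         if not rest:
--             res.append(partial)
--             return
--         idx = partial[-1]
--         if rest[0] == 1:
--             cands = range(idx - 1, 0, -1)
--         else:
--             cands = range(idx + 1, n + 1)
--         for num in cands:
--             if num not in partial:
--                 go(partial + [num], rest[1:])
--
--     for i in range(1, n + 1):
--         go([i], yq)
--     return res
-- ===== Notes on version B (the rewrite author's own statement) =====
-- stated objective: idiomatic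
-- what changed: Replaces A's explicit BFS queue (level-by-level pop-from-front/append-to-back over the whole frontier) with recursive DFS backtracking that extends one partial permutation at a time with the same child ordering, so the result list is identical.
import Mathlib
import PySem

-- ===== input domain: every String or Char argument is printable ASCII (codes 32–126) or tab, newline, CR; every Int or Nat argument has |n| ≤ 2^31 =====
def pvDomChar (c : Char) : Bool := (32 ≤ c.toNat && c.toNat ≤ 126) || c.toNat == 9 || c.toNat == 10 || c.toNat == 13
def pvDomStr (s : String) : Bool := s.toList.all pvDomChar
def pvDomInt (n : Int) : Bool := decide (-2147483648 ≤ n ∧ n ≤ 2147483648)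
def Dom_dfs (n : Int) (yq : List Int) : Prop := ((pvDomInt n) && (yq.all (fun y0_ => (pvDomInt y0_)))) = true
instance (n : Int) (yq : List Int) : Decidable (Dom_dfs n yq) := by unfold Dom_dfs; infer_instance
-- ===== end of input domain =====

-- B replaces A's explicit BFS queue (level-by-level pop/append) by recursive DFS backtracking with
-- the same child ordering, so the returned list is identical; objective: idiomatic/alternative.

-- ===== PORT A =====
-- termination helper for dfsWhile: appending children (all one longer than temp) does not
-- change the number of length-(i+1) queue entries
theorem pvCountFold (i : Int) (temp : List Int) (hl : (temp.length : Int) = i + 1) :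
    ∀ (l : List Int) (q : List (List Int)),
      (l.foldl (fun q num => if !(temp.contains num) then q ++ [temp ++ [num]] else q) q).countP
        (fun t => decide ((t.length : Int) = i + 1)) =
      q.countP (fun t => decide ((t.length : Int) = i + 1)) := by
  intro l
  induction l with
  | nil => intro q; rfl
  | cons x xs ih =>
    intro q
    rw [List.foldl_cons]
    cases hx : temp.contains x
    · have h0 : List.countP (fun t => decide ((t.length : Int) = i + 1)) [temp ++ [x]] = 0 := by
        simp
        omega
      rw [if_pos (by decide), ih, List.countP_append, h0]
      omega
    · rw [if_neg (by decide)]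
      exact ih q

-- the inner 'while queue and len(queue[0]) == (i+1)' loop of A; temp[-1] is ported as
-- pyGetD temp (-1) 0 (exact: every queue element is nonempty, so Python never raises here)
def dfsWhile (n : Int) (c : Int) (i : Int) (queue : List (List Int)) : List (List Int) :=
  match queue with
  | [] => []
  | temp :: rest =>
    if _h : (temp.length : Int) = i + 1 then
      let idx := PySem.List.pyGetD temp (-1) 0
      let q' :=
        if c = 1 then
          if idx = 1 then rest
          else (PySem.List.pyRange (idx - 1) 0 (-1)).foldl
                 (fun q num => if !(temp.contains num) then q ++ [temp ++ [num]] else q) rest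
        else
          if idx = n then rest
          else (PySem.List.pyRange (idx + 1) (n + 1) 1).foldl
                 (fun q num => if !(temp.contains num) then q ++ [temp ++ [num]] else q) rest
      dfsWhile n c i q'
    else temp :: rest
  termination_by (queue.countP (fun t => decide ((t.length : Int) = i + 1)))
  decreasing_by
    simp only [List.countP_cons, _h, dite_eq_ite]
    split
    · split
      · simp
      · rw [pvCountFold i temp _h]
        simp
    · split
      · simp
      · rw [pvCountFold i temp _h]
        simp

def dfs (n : Int) (yq : List Int) : List (List Int) :=
  let queue := (PySem.List.pyRange 1 (n + 1) 1).map (fun i => [i])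
  (PySem.List.pyRange 0 (yq.length : Int) 1).foldl
    (fun queue i => dfsWhile n (PySem.List.pyGetD yq i 0) i queue) queue

-- ===== PORT B =====
-- recursive helper go(part, rest) of Source B (res threaded as an accumulator); the 'for num in cands'
-- loop is the mutual goFor; part[-1] ported as pyGetD part (-1) 0 (part is never empty)
mutual
def dfsGo (n : Int) (part : List Int) (rest : List Int) (res : List (List Int)) : List (List Int) :=
  match rest with
  | [] => res ++ [part]
  | c :: rest' =>
    let idx := PySem.List.pyGetD part (-1) 0
    let cands := if c = 1 then PySem.List.pyRange (idx - 1) 0 (-1)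
                 else PySem.List.pyRange (idx + 1) (n + 1) 1
    dfsGoFor n part rest' cands res
  termination_by (rest.length, 0)

def dfsGoFor (n : Int) (part : List Int) (rest' : List Int) (cands : List Int)
    (res : List (List Int)) : List (List Int) :=
  match cands with
  | [] => res
  | num :: cs =>
      dfsGoFor n part rest' cs
        (if !(part.contains num) then dfsGo n (part ++ [num]) rest' res else res)
  termination_by (rest'.length, cands.length + 1)
end

def dfs_alt (n : Int) (yq : List Int) : List (List Int) :=
  (PySem.List.pyRange 1 (n + 1) 1).foldl (fun res i => dfsGo n [i] yq res) []

-- ===== PRECONDITION & SPEC =====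
def Spec_dfs (n : Int) (yq : List Int) (out : List (List Int)) : Prop := out = dfs_alt n yq
instance (n : Int) (yq : List Int) (out : List (List Int)) : Decidable (Spec_dfs n yq out) := by unfold Spec_dfs; infer_instance

-- ===== CLAIM (what is proved, stated in full; the proofs are below) =====
def Claim_equal_dfs : Prop := ∀ (n : Int) (yq : List Int), Dom_dfs n yq → Spec_dfs n yq (dfs n yq)

-- ===== LEMMAS AND PROOFS =====

-- candidate successors of a part permutation under constraint c
def pvCands (n : Int) (c : Int) (p : List Int) : List Int :=
  let idx := PySem.List.pyGetD p (-1) 0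
  if c = 1 then PySem.List.pyRange (idx - 1) 0 (-1)
  else PySem.List.pyRange (idx + 1) (n + 1) 1

-- the full extensions of p under the remaining constraints, in the shared child order
def pvLeaves (n : Int) (p : List Int) : List Int → List (List Int)
  | [] => [p]
  | c :: rest =>
      ((pvCands n c p).filter (fun num => !(p.contains num))).flatMap
        (fun num => pvLeaves n (p ++ [num]) rest)

-- B side: goFor/go accumulate pvLeaves
theorem dfsGoFor_eq (n : Int) (p rest' : List Int)
    (IH : ∀ num res, dfsGo n (p ++ [num]) rest' res = res ++ pvLeaves n (p ++ [num]) rest') :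
    ∀ (cands : List Int) (res : List (List Int)),
      dfsGoFor n p rest' cands res =
        res ++ (cands.filter (fun num => !(p.contains num))).flatMap
          (fun num => pvLeaves n (p ++ [num]) rest') := by
  intro cands
  induction cands with
  | nil => intro res; simp [dfsGoFor]
  | cons num cs ih =>
    intro res
    rw [dfsGoFor, ih]
    by_cases hm : num ∈ p
    · simp [hm]
    · simp [hm, IH]

theorem dfsGo_eq (n : Int) (rest : List Int) :
    ∀ (p : List Int) (res : List (List Int)),
      dfsGo n p rest res = res ++ pvLeaves n p rest := by
  induction rest with
  | nil => intro p res; simp [dfsGo, pvLeaves]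
  | cons c rest' ih =>
    intro p res
    rw [dfsGo, dfsGoFor_eq n p rest' (fun num res => ih (p ++ [num]) res)]
    simp [pvLeaves, pvCands]

-- the children A enqueues for one popped element (both 'continue' branches produce
-- exactly the empty candidate range, so they are absorbed)
theorem dfsWhile_step (n c i : Int) (temp : List Int) (rest : List (List Int))
    (hl : (temp.length : Int) = i + 1) :
    dfsWhile n c i (temp :: rest) =
      dfsWhile n c i (rest ++
        ((pvCands n c temp).filter (fun num => !(temp.contains num))).map
          (fun num => temp ++ [num])) := by
  conv_lhs => rw [dfsWhile]
  rw [dif_pos hl]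
  simp only [pvCands]
  by_cases hc : c = 1
  · subst hc
    by_cases h1 : PySem.List.pyGetD temp (-1) 0 = 1
    · rw [h1, PySem.List.pyRange_neg_one_eq_nil (by omega : (1 : Int) - 1 ≤ 0)]
      simp
    · simp only [if_true, if_neg h1]
      rw [PySem.List.foldl_append_if (p := fun num => !(temp.contains num))
            (f := fun num => temp ++ [num])]
  · by_cases h2 : PySem.List.pyGetD temp (-1) 0 = n
    · rw [h2, PySem.List.pyRange_one_eq_nil (by omega : n + 1 ≤ n + 1)]
      simp [hc]
    · simp only [if_neg hc, if_neg h2]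
      rw [PySem.List.foldl_append_if (p := fun num => !(temp.contains num))
            (f := fun num => temp ++ [num])]

-- A's while loop processes exactly the length-(i+1) prefix and appends all children
theorem dfsWhile_flat (n c i : Int) :
    ∀ (q r : List (List Int)),
      (∀ t ∈ q, (t.length : Int) = i + 1) → (∀ t ∈ r, (t.length : Int) = i + 2) →
      dfsWhile n c i (q ++ r) =
        r ++ q.flatMap (fun t =>
          ((pvCands n c t).filter (fun num => !(t.contains num))).map
            (fun num => t ++ [num])) := by
  intro q
  induction q with
  | nil =>
    intro r _ hr
    match r with
    | [] => simp [dfsWhile]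
    | t :: r' =>
      rw [List.nil_append, dfsWhile]
      have := hr t (by simp)
      simp only [dif_neg (by omega : ¬ ((t.length : Int) = i + 1))]
      simp
  | cons t q' ih =>
    intro r hq hr
    have ht := hq t (by simp)
    rw [List.cons_append, dfsWhile_step n c i t (q' ++ r) ht, List.append_assoc,
        ih (r ++ _) (fun x hx => hq x (by simp [hx]))]
    · simp
    · intro x hx
      rcases List.mem_append.mp hx with h | h
      · exact hr x h
      · rcases List.mem_map.mp h with ⟨num, _, rfl⟩
        simp only [List.length_append, List.length_cons, List.length_nil]
        push_cast
        omega

-- BFS levels = DFS leaves: folding dfsWhile over the enumerated constraints flattens to pvLeaves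
theorem bfs_levels (n : Int) :
    ∀ (ys : List Int) (s : Int) (q : List (List Int)),
      (∀ t ∈ q, (t.length : Int) = s + 1) →
      (PySem.List.enumerate ys s).foldl (fun queue p => dfsWhile n p.2 p.1 queue) q =
        q.flatMap (fun t => pvLeaves n t ys) := by
  intro ys
  induction ys with
  | nil =>
    intro s q _
    simp [PySem.List.enumerate_nil, pvLeaves]
  | cons c ys' ih =>
    intro s q hq
    rw [PySem.List.enumerate_cons, List.foldl_cons]
    have hstep := dfsWhile_flat n c s q [] hq (by simp)
    rw [List.append_nil] at hstep
    rw [hstep, List.nil_append,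
        ih (s + 1) _ (by
          intro x hx
          rcases List.mem_flatMap.mp hx with ⟨t, htq, hx⟩
          rcases List.mem_map.mp hx with ⟨num, _, rfl⟩
          have := hq t htq
          simp only [List.length_append, List.length_cons, List.length_nil]
          push_cast
          omega)]
    rw [List.flatMap_assoc]
    congr 1
    funext t
    simp [pvLeaves, List.flatMap_map]

theorem dfs_eq_leaves (n : Int) (yq : List Int) :
    dfs n yq = (PySem.List.pyRange 1 (n + 1) 1).flatMap (fun i => pvLeaves n [i] yq) := by
  unfold dfs
  have henum := PySem.List.enumerate_eq_map_pyRange yq (0 : Int)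
  have : (PySem.List.pyRange 0 (yq.length : Int) 1).foldl
      (fun queue i => dfsWhile n (PySem.List.pyGetD yq i 0) i queue)
      ((PySem.List.pyRange 1 (n + 1) 1).map (fun i => [i])) =
      (PySem.List.enumerate yq 0).foldl (fun queue p => dfsWhile n p.2 p.1 queue)
      ((PySem.List.pyRange 1 (n + 1) 1).map (fun i => [i])) := by
    rw [henum, List.foldl_map]
    simp
  rw [this, bfs_levels n yq 0 _ (by
    intro t ht
    rcases List.mem_map.mp ht with ⟨i, _, rfl⟩
    simp), List.flatMap_map]

theorem dfs_alt_eq_leaves (n : Int) (yq : List Int) :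
    dfs_alt n yq = (PySem.List.pyRange 1 (n + 1) 1).flatMap (fun i => pvLeaves n [i] yq) := by
  unfold dfs_alt
  rw [show (fun res i => dfsGo n [i] yq res) = (fun res i => res ++ pvLeaves n [i] yq) from
        funext fun res => funext fun i => dfsGo_eq n yq [i] res,
      PySem.List.foldl_append_eq_flatMap]
  simp

-- ===== VERDICT (by name: the statement is the Claim_ definition above) =====
theorem dfs_spec : Claim_equal_dfs := by
  intro n yq _
  unfold Spec_dfs
  rw [dfs_eq_leaves, dfs_alt_eq_leaves]
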